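-- pv_equiv track=rewrite | github.com/mkXultra/mew | src/mew/programmer.py | extract_follow_up_text
-- ===== SOURCE A (Python) =====
-- def extract_follow_up_text(text):
--     lines = (text or "").splitlines()
--     in_follow_up = False
--     collected = []
--     for line in lines:
--         stripped = line.strip()
--         if stripped.upper().startswith("FOLLOW_UP"):
--             in_follow_up = True
--             continue
--         if in_follow_up and stripped.upper().startswith(("STATUS:", "SUMMARY:", "FINDINGS:")):
--             break
--         if in_follow_up and stripped:
--             item = stripped.lstrip("- ").strip()
--             if item and item.casefold() != "none":
--                 collected.append(item)
--     return "\n".join(collected).strip()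
-- ===== SOURCE B (Python) =====
-- def extract_follow_up_text(text):
--     lines = (text or "").splitlines()
--
--     def is_marker(line):
--         return line.strip().upper().startswith("FOLLOW_UP")
--
--     def is_term(line):
--         return line.strip().upper().startswith(("STATUS:", "SUMMARY:", "FINDINGS:"))
--
--     def clean(line):
--         if is_marker(line):
--             return None
--         s = line.strip()
--         if not s:
--             return None
--         item = s.lstrip("- ").strip()
--         if item and item.casefold() != "none":
--             return item
--         return None
--
--     start = next((i for i, l in enumerate(lines) if is_marker(l)), None)
--     if start is None:
--         return ""
--     body = lines[start + 1:]
--     end = next((i for i, l in enumerate(body) if is_term(l)), len(body))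
--     items = [clean(l) for l in body[:end]]
--     return "\n".join(i for i in items if i is not None).strip()
-- ===== Notes on version B (the rewrite author's own statement) =====
-- stated objective: alternative
-- what changed: A's single loop with an in_follow_up flag and a break is replaced by three phases: drop lines up to and including the first FOLLOW_UP marker, take lines up to the first terminator, then filter/clean each kept line; no flag state remains.
import Mathlib
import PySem

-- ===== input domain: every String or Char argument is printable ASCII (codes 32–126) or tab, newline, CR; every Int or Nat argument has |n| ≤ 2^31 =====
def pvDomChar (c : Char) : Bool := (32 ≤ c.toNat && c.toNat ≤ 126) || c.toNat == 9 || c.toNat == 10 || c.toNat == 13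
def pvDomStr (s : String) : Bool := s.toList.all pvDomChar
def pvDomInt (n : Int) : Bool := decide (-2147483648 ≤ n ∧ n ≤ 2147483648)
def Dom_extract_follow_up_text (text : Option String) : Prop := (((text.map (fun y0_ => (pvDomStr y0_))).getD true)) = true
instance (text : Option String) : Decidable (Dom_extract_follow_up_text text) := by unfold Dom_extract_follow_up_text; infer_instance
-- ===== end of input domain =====

-- B replaces A's single flag-machine loop by three phases (skip to the marker, take up to
-- a terminator, filter/clean the kept lines); objective: alternative decomposition, same cost.

-- ===== PORT A =====
-- hand port of Python's s.lstrip("- ") (drop leading '-' and ' ' characters; exact)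
def pvLstripDashSpace (s : String) : String :=
  String.ofList (s.toList.dropWhile (fun c => c == '-' || c == ' '))

-- A's loop: in_follow_up flag + collected accumulator; `break` returns acc.
-- (item.casefold() on the ASCII domain is PySem.Str.lower)
def pvA_loop : List String → Bool → List String → List String
  | [], _, acc => acc
  | line :: rest, flag, acc =>
    let stripped := PySem.Str.strip line
    if PySem.Str.startswith (PySem.Str.upper stripped) "FOLLOW_UP" then
      pvA_loop rest true acc
    else if flag && (PySem.Str.startswith (PySem.Str.upper stripped) "STATUS:" ||
                     PySem.Str.startswith (PySem.Str.upper stripped) "SUMMARY:" ||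
                     PySem.Str.startswith (PySem.Str.upper stripped) "FINDINGS:") then
      acc
    else if flag && !(stripped == "") then
      let item := PySem.Str.strip (pvLstripDashSpace stripped)
      if !(item == "") && !(PySem.Str.lower item == "none") then
        pvA_loop rest flag (acc ++ [item])
      else
        pvA_loop rest flag acc
    else
      pvA_loop rest flag acc

def extract_follow_up_text (text : Option String) : String :=
  PySem.Str.strip (PySem.Str.join "\n" (pvA_loop (PySem.Str.splitlines (text.getD "")) false []))

-- ===== PORT B =====
def pvB_isMarker (line : String) : Bool :=
  PySem.Str.startswith (PySem.Str.upper (PySem.Str.strip line)) "FOLLOW_UP"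

def pvB_isTerm (line : String) : Bool :=
  let u := PySem.Str.upper (PySem.Str.strip line)
  PySem.Str.startswith u "STATUS:" || PySem.Str.startswith u "SUMMARY:" ||
    PySem.Str.startswith u "FINDINGS:"

def pvB_clean (line : String) : Option String :=
  if pvB_isMarker line then none
  else
    let s := PySem.Str.strip line
    if s == "" then none
    else
      let item := PySem.Str.strip (pvLstripDashSpace s)
      if !(item == "") && !(PySem.Str.lower item == "none") then some item else none

def extract_follow_up_text_alt (text : Option String) : String :=
  let lines := PySem.Str.splitlines (text.getD "")
  match lines.dropWhile (fun l => !pvB_isMarker l) with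
  | [] => ""
  | _ :: body =>
    let sec := body.takeWhile (fun l => !pvB_isTerm l)
    PySem.Str.strip (PySem.Str.join "\n" (sec.filterMap pvB_clean))

-- ===== PRECONDITION & SPEC =====
def Spec_extract_follow_up_text (text : Option String) (out : String) : Prop := out = extract_follow_up_text_alt text
instance (text : Option String) (out : String) : Decidable (Spec_extract_follow_up_text text out) := by unfold Spec_extract_follow_up_text; infer_instance

-- ===== CLAIM (what is proved, stated in full; the proofs are below) =====
def Claim_equal_extract_follow_up_text : Prop := ∀ (text : Option String), Dom_extract_follow_up_text text → Spec_extract_follow_up_text text (extract_follow_up_text text)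

-- ===== LEMMAS AND PROOFS =====

-- A's inline terminator test is B's pvB_isTerm.
theorem pvB_isTerm_eq (l : String) :
    (PySem.Str.startswith (PySem.Str.upper (PySem.Str.strip l)) "STATUS:" ||
     PySem.Str.startswith (PySem.Str.upper (PySem.Str.strip l)) "SUMMARY:" ||
     PySem.Str.startswith (PySem.Str.upper (PySem.Str.strip l)) "FINDINGS:") = pvB_isTerm l := rfl

-- A line whose stripped-upper form starts with "FOLLOW_UP" cannot start with a terminator.
theorem pvMarker_not_term (l : String)
    (h : PySem.Str.startswith (PySem.Str.upper (PySem.Str.strip l)) "FOLLOW_UP" = true) :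
    pvB_isTerm l = false := by
  simp only [PySem.Str.startswith_eq, PySem.Chars.startswith_iff] at h
  simp only [pvB_isTerm, Bool.or_eq_false_iff, PySem.Str.startswith_eq]
  refine ⟨⟨?_, ?_⟩, ?_⟩ <;>
  · rw [Bool.eq_false_iff, Ne, PySem.Chars.startswith_iff]
    intro h2
    have := List.prefix_of_prefix_length_le h2 h (by decide)
    revert this; decide

-- A's loop with the flag set equals B's take-then-filter phases.
theorem pvA_loop_true (lines : List String) (acc : List String) :
    pvA_loop lines true acc =
      acc ++ (lines.takeWhile (fun l => !pvB_isTerm l)).filterMap pvB_clean := by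
  induction lines generalizing acc with
  | nil => simp [pvA_loop]
  | cons l rest ih =>
    simp only [pvA_loop, Bool.true_and]
    by_cases hm : PySem.Str.startswith (PySem.Str.upper (PySem.Str.strip l)) "FOLLOW_UP" = true
    · have htm := pvMarker_not_term l hm
      have hc : pvB_clean l = none := by
        unfold pvB_clean pvB_isMarker; rw [if_pos hm]
      rw [if_pos hm, ih, List.takeWhile_cons]
      simp [htm, hc]
    · rw [if_neg hm, pvB_isTerm_eq]
      by_cases ht : pvB_isTerm l = true
      · rw [if_pos ht]
        simp [ht]
      · have ht' : pvB_isTerm l = false := by simpa using ht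
        rw [if_neg ht]
        by_cases hs : (PySem.Str.strip l == "") = true
        · have hc : pvB_clean l = none := by
            unfold pvB_clean pvB_isMarker; rw [if_neg hm, if_pos hs]
          rw [show (!(PySem.Str.strip l == "")) = false by rw [hs]; rfl]
          rw [if_neg (by simp), ih, List.takeWhile_cons]
          simp [ht', hc]
        · have hs' : (PySem.Str.strip l == "") = false := by simpa using hs
          rw [show (!(PySem.Str.strip l == "")) = true by rw [hs']; rfl, if_pos rfl]
          by_cases hi : (!(PySem.Str.strip (pvLstripDashSpace (PySem.Str.strip l)) == "") &&
              !(PySem.Str.lower (PySem.Str.strip (pvLstripDashSpace (PySem.Str.strip l))) == "none")) = true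
          · have hc : pvB_clean l = some (PySem.Str.strip (pvLstripDashSpace (PySem.Str.strip l))) := by
              unfold pvB_clean pvB_isMarker; rw [if_neg hm, if_neg hs, if_pos hi]
            rw [if_pos hi, ih, List.takeWhile_cons]
            simp [ht', hc]
          · have hc : pvB_clean l = none := by
              unfold pvB_clean pvB_isMarker; rw [if_neg hm, if_neg hs, if_neg hi]
            rw [if_neg hi, ih, List.takeWhile_cons]
            simp [ht', hc]

-- A's loop with the flag clear skips to the first marker line (B's drop phase).
theorem pvA_loop_false (lines : List String) (acc : List String) :
    pvA_loop lines false acc =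
      match lines.dropWhile (fun l => !pvB_isMarker l) with
      | [] => acc
      | _ :: body => pvA_loop body true acc := by
  induction lines with
  | nil => simp [pvA_loop, List.dropWhile]
  | cons l rest ih =>
    simp only [pvA_loop, Bool.false_and, List.dropWhile_cons]
    by_cases hm : PySem.Str.startswith (PySem.Str.upper (PySem.Str.strip l)) "FOLLOW_UP" = true
    · have hm' : (!pvB_isMarker l) = false := by
        unfold pvB_isMarker; rw [hm]; rfl
      rw [if_pos hm, hm']
      simp
    · have hm' : (!pvB_isMarker l) = true := by
        unfold pvB_isMarker
        rw [Bool.eq_false_iff.mpr hm]; rfl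
      rw [if_neg hm, if_neg (by simp), if_neg (by simp), ih, hm']
      simp

-- ===== VERDICT (by name: the statement is the Claim_ definition above) =====
theorem extract_follow_up_text_spec : Claim_equal_extract_follow_up_text := by
  intro text _
  unfold Spec_extract_follow_up_text
  simp only [extract_follow_up_text, extract_follow_up_text_alt]
  rw [pvA_loop_false]
  cases h : List.dropWhile (fun l => !pvB_isMarker l) (PySem.Str.splitlines (text.getD "")) with
  | nil => decide
  | cons m body => simp [pvA_loop_true]
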